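-- pv_equiv track=rewrite | github.com/eppen/tetris-ai | tetris.py | get_piece_positions
-- ===== SOURCE A (Python) =====
-- def get_piece_positions(shape, x, y, rotation):
--     """获取指定旋转状态下方块的位置"""
--     # 应用旋转
--     rotated_shape = shape
--     for _ in range(rotation):
--         rows = len(rotated_shape)
--         cols = len(rotated_shape[0])
--         rotated = [[0 for _ in range(rows)] for _ in range(cols)]
--         for r in range(rows):
--             for c in range(cols):
--                 rotated[c][rows - 1 - r] = rotated_shape[r][c]
--         rotated_shape = rotated
--
--     positions = []
--     for r in range(len(rotated_shape)):
--         for c in range(len(rotated_shape[0])):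
--             if rotated_shape[r][c]:
--                 positions.append((x + c, y + r))
--     return positions
-- ===== SOURCE B (Python) =====
-- def get_piece_positions(shape, x, y, rotation):
--     """获取指定旋转状态下方块的位置"""
--     if not shape:
--         return []
--     k = rotation % 4 if rotation > 0 else 0
--     R, C = len(shape), len(shape[0])
--     fr_n, fc_n = (R, C) if k % 2 == 0 else (C, R)
--     out = []
--     for fr in range(fr_n):
--         for fc in range(fc_n):
--             if k == 0:
--                 v = shape[fr][fc]
--             elif k == 1:
--                 v = shape[R - 1 - fc][fr]
--             elif k == 2:
--                 v = shape[R - 1 - fr][C - 1 - fc]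
--             else:
--                 v = shape[fc][C - 1 - fr]
--             if v:
--                 out.append((x + fc, y + fr))
--     return out
-- ===== Notes on version B (the rewrite author's own statement) =====
-- stated objective: faster
-- what changed: B replaces the rotation-times grid-rebuilding loop by a single pass over the final grid using k = rotation % 4 and the closed-form inverse index map back into the original shape, building no intermediate grids.
import Mathlib
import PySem

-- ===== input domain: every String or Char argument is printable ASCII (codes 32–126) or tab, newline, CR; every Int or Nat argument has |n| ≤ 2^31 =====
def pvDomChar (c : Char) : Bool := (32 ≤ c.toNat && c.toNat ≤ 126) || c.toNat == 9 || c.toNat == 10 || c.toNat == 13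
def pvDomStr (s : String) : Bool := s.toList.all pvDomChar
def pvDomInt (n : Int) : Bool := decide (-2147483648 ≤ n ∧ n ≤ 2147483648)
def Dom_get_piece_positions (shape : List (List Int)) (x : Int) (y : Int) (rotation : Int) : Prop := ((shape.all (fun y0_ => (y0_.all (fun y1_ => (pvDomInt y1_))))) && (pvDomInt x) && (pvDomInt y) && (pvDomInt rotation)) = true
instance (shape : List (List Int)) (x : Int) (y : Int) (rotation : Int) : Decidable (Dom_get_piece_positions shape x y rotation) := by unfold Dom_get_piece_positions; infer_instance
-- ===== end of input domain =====

-- B replaces A's rotation-times grid rebuilding by one pass over the final grid with k = rotation % 4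
-- and the closed-form inverse index map into the original shape (objective: faster, no intermediate grids).

-- ===== PORT A =====
-- one step of A's rotation loop: rotated[c][rows-1-r] = g[r][c], i.e. row c of the result,
-- read at position j = rows-1-r, is g[rows-1-j][c] (functional rendering of the preallocated 0-matrix fill)
def rot90A (g : List (List Int)) : List (List Int) :=
  let rows := g.length
  let cols := (g.headD []).length               -- len(rotated_shape[0]); headD is only read where Python does not raise
  (List.range cols).map (fun c => (List.range rows).map (fun j => (g.getD (rows - 1 - j) []).getD c 0))

-- port of A; range(rotation) has rotation.toNat iterations, indices r, c are the Nat loop counters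
def get_piece_positions (shape : List (List Int)) (x : Int) (y : Int) (rotation : Int) : List (Int × Int) :=
  let rotated := (List.range rotation.toNat).foldl (fun g _ => rot90A g) shape
  (List.range rotated.length).foldl (fun acc r =>
    (List.range (rotated.headD []).length).foldl (fun acc c =>
      if (rotated.getD r []).getD c 0 ≠ 0 then acc ++ [((x + (c : Int)), (y + (r : Int)))] else acc) acc) []

-- ===== PORT B =====
def get_piece_positions_alt (shape : List (List Int)) (x : Int) (y : Int) (rotation : Int) : List (Int × Int) :=
  match shape with
  | [] => []
  | _ :: _ =>
    let k : Nat := if 0 < rotation then (PySem.Int.mod rotation 4).toNat else 0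
    let R := shape.length
    let C := (shape.headD []).length
    let frn := if k % 2 = 0 then R else C
    let fcn := if k % 2 = 0 then C else R
    (List.range frn).foldl (fun acc fr =>
      (List.range fcn).foldl (fun acc fc =>
        if (if k = 0 then (shape.getD fr []).getD fc 0
            else if k = 1 then (shape.getD (R - 1 - fc) []).getD fr 0
            else if k = 2 then (shape.getD (R - 1 - fr) []).getD (C - 1 - fc) 0
            else (shape.getD fc []).getD (C - 1 - fr) 0) ≠ 0
        then acc ++ [((x + (fc : Int)), (y + (fr : Int)))] else acc) acc) []

-- ===== PRECONDITION & SPEC =====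
-- Pre_ is exactly A's non-raising set: A raises IndexError iff some row is shorter than the first row,
-- or shape is empty with rotation ≥ 1, or the first row is empty with rotation ≥ 2.
def Pre_get_piece_positions (shape : List (List Int)) (x : Int) (y : Int) (rotation : Int) : Prop :=
  (∀ row ∈ shape, (shape.headD []).length ≤ row.length) ∧
  (1 ≤ rotation → shape ≠ []) ∧
  (2 ≤ rotation → 0 < (shape.headD []).length)
instance (shape : List (List Int)) (x : Int) (y : Int) (rotation : Int) : Decidable (Pre_get_piece_positions shape x y rotation) := by unfold Pre_get_piece_positions; infer_instance
def pvWitness_get_piece_positions : List (List Int) × Int × Int × Int := ([[1, 0], [1, 1]], 3, -2, 5)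

def Spec_get_piece_positions (shape : List (List Int)) (x : Int) (y : Int) (rotation : Int) (out : List (Int × Int)) : Prop := out = get_piece_positions_alt shape x y rotation
instance (shape : List (List Int)) (x : Int) (y : Int) (rotation : Int) (out : List (Int × Int)) : Decidable (Spec_get_piece_positions shape x y rotation out) := by unfold Spec_get_piece_positions; infer_instance

-- ===== CLAIM (what is proved, stated in full; the proofs are below) =====
def Claim_equal_get_piece_positions : Prop := ∀ (shape : List (List Int)) (x : Int) (y : Int) (rotation : Int), Dom_get_piece_positions shape x y rotation → Pre_get_piece_positions shape x y rotation → Spec_get_piece_positions shape x y rotation (get_piece_positions shape x y rotation)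
-- ===== LEMMAS AND PROOFS =====

-- canonical grid: n rows, m cols, entry f i j
def mkG (n m : Nat) (f : Nat → Nat → Int) : List (List Int) := (List.range n).map (fun i => (List.range m).map (f i))

theorem rot90A_eq (g : List (List Int)) :
    rot90A g = mkG (g.headD []).length g.length (fun i j => (g.getD (g.length - 1 - j) []).getD i 0) := rfl

theorem length_mkG (n m : Nat) (f : Nat → Nat → Int) : (mkG n m f).length = n := by
  simp [mkG]

theorem headD_mkG (n m : Nat) (f : Nat → Nat → Int) (hn : 0 < n) :
    ((mkG n m f).headD []).length = m := by
  cases n with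
  | zero => omega
  | succ n => simp [mkG, List.range_succ_eq_map]

theorem getD_mkG (n m : Nat) (f : Nat → Nat → Int) (i j : Nat) (hi : i < n) (hj : j < m) :
    ((mkG n m f).getD i []).getD j 0 = f i j := by
  simp [mkG, List.getD, hi, hj]

theorem mkG_congr (n m : Nat) (f f' : Nat → Nat → Int)
    (h : ∀ i < n, ∀ j < m, f i j = f' i j) : mkG n m f = mkG n m f' := by
  simp only [mkG]
  apply List.map_congr_left
  intro i hi
  apply List.map_congr_left
  intro j hj
  exact h i (List.mem_range.mp hi) j (List.mem_range.mp hj)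

theorem rot_mkG (n m : Nat) (f : Nat → Nat → Int) (hn : 0 < n) :
    rot90A (mkG n m f) = mkG m n (fun i j => f (n - 1 - j) i) := by
  rw [rot90A_eq, length_mkG, headD_mkG n m f hn]
  apply mkG_congr
  intro i hi j hj
  exact getD_mkG n m f (n - 1 - j) i (by omega) hi

-- the shared positions loop shape (row-major scan appending (x+c, y+r) when the test value is nonzero)
def posLoop (x y : Int) (n m : Nat) (t : Nat → Nat → Int) : List (Int × Int) :=
  (List.range n).foldl (fun acc r =>
    (List.range m).foldl (fun acc c =>
      if t r c ≠ 0 then acc ++ [((x + (c : Int)), (y + (r : Int)))] else acc) acc) []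

theorem foldl_test_congr (x y : Int) (r : Nat) (t t' : Nat → Nat → Int) (l : List Nat)
    (h : ∀ c ∈ l, t r c = t' r c) : ∀ acc : List (Int × Int),
    l.foldl (fun acc c => if t r c ≠ 0 then acc ++ [((x + (c : Int)), (y + (r : Int)))] else acc) acc
    = l.foldl (fun acc c => if t' r c ≠ 0 then acc ++ [((x + (c : Int)), (y + (r : Int)))] else acc) acc := by
  induction l with
  | nil => intro acc; rfl
  | cons a l ih =>
      intro acc
      simp only [List.foldl_cons, h a (List.mem_cons_self)]
      exact ih (fun c hc => h c (List.mem_cons_of_mem _ hc)) _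

theorem posLoop_congr (x y : Int) (n m : Nat) (t t' : Nat → Nat → Int)
    (h : ∀ r < n, ∀ c < m, t r c = t' r c) : posLoop x y n m t = posLoop x y n m t' := by
  unfold posLoop
  suffices H : ∀ (l : List Nat), (∀ r ∈ l, r < n) → ∀ acc : List (Int × Int),
      l.foldl (fun acc r => (List.range m).foldl (fun acc c => if t r c ≠ 0 then acc ++ [((x + (c : Int)), (y + (r : Int)))] else acc) acc) acc
      = l.foldl (fun acc r => (List.range m).foldl (fun acc c => if t' r c ≠ 0 then acc ++ [((x + (c : Int)), (y + (r : Int)))] else acc) acc) acc by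
    exact H (List.range n) (fun r hr => List.mem_range.mp hr) []
  intro l hl
  induction l with
  | nil => intro acc; rfl
  | cons a l ih =>
      intro acc
      simp only [List.foldl_cons]
      rw [foldl_test_congr x y a t t' (List.range m)
            (fun c hc => h a (hl a (List.mem_cons_self)) c (List.mem_range.mp hc))]
      exact ih (fun r hr => hl r (List.mem_cons_of_mem _ hr)) _

-- A's positions loop over a canonical grid is posLoop over its entry function
theorem posLoop_mkG (x y : Int) (n m : Nat) (f : Nat → Nat → Int) (hn : 0 < n) :
    posLoop x y (mkG n m f).length ((mkG n m f).headD []).length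
      (fun r c => ((mkG n m f).getD r []).getD c 0)
    = posLoop x y n m f := by
  rw [length_mkG, headD_mkG n m f hn]
  exact posLoop_congr x y n m _ f (fun r hr c hc => getD_mkG n m f r c hr hc)

theorem foldl_rot (l : List Nat) : ∀ g : List (List Int),
    l.foldl (fun g _ => rot90A g) g = rot90A^[l.length] g := by
  induction l with
  | nil => intro g; rfl
  | cons a l ih => intro g; simp only [List.foldl_cons, List.length_cons,
      Function.iterate_succ_apply, ih]

-- the four canonical rotated forms of shape (e = entry of shape, R = rows, C = first-row width)
theorem rot_iter_forms (shape : List (List Int)) (hne : shape ≠ [])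
    (hC : 0 < (shape.headD []).length) :
    ∀ n : Nat, 1 ≤ n →
      rot90A^[n] shape =
        (if n % 4 = 1 then
          mkG (shape.headD []).length shape.length
            (fun i j => (shape.getD (shape.length - 1 - j) []).getD i 0)
        else if n % 4 = 2 then
          mkG shape.length (shape.headD []).length
            (fun i j => (shape.getD (shape.length - 1 - i) []).getD ((shape.headD []).length - 1 - j) 0)
        else if n % 4 = 3 then
          mkG (shape.headD []).length shape.length
            (fun i j => (shape.getD j []).getD ((shape.headD []).length - 1 - i) 0)
        else
          mkG shape.length (shape.headD []).length
            (fun i j => (shape.getD i []).getD j 0)) := by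
  have hR : 0 < shape.length := List.length_pos_iff.mpr hne
  set R := shape.length with hRdef
  set C := (shape.headD []).length with hCdef
  set e : Nat → Nat → Int := fun i j => (shape.getD i []).getD j 0 with hedef
  have h1 : rot90A shape = mkG C R (fun i j => e (R - 1 - j) i) := by
    exact rot90A_eq shape
  have h2 : rot90A (rot90A shape) = mkG R C (fun i j => e (R - 1 - i) (C - 1 - j)) := by
    rw [h1, rot_mkG C R _ hC]
  have h3 : rot90A (rot90A (rot90A shape)) = mkG C R (fun i j => e j (C - 1 - i)) := by
    rw [h2, rot_mkG R C _ hR]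
    exact mkG_congr _ _ _ _ (by intro i hi j hj; congr 2 <;> omega)
  have h4 : rot90A (rot90A (rot90A (rot90A shape))) = mkG R C e := by
    rw [h3, rot_mkG C R _ hC]
    refine Eq.trans (mkG_congr _ _ _ (fun i j => e i j) ?_) ?_
    · intro i hi j hj; congr 1; omega
    · rfl
  have e1 : rot90A^[1] shape = rot90A shape := rfl
  have e2 : rot90A^[2] shape = rot90A (rot90A shape) := rfl
  have e3 : rot90A^[3] shape = rot90A (rot90A (rot90A shape)) := rfl
  have e4 : rot90A^[4] shape = rot90A (rot90A (rot90A (rot90A shape))) := rfl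
  have hper : ∀ m : Nat, 1 ≤ m → rot90A^[m + 4] shape = rot90A^[m] shape := by
    intro m hm
    rw [Function.iterate_add_apply, e4, h4]
    cases m with
    | zero => omega
    | succ m =>
        rw [Function.iterate_succ_apply, Function.iterate_succ_apply,
          rot_mkG R C e hR, ← h1]
  intro n
  induction n using Nat.strong_induction_on with
  | _ n ih =>
    intro hn
    by_cases hbig : n < 5
    · interval_cases n
      · rw [e1, h1, hedef]; norm_num
      · rw [e2, h2, hedef]; norm_num
      · rw [e3, h3, hedef]; norm_num
      · rw [e4, h4, hedef]; norm_num
    · have heq : n = (n - 4) + 4 := by omega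
      have this4 : (n - 4) % 4 = n % 4 := by omega
      have h45 : rot90A^[n] shape = rot90A^[n - 4] shape := by
        conv_lhs => rw [heq]
        exact hper (n - 4) (by omega)
      rw [h45, ih (n - 4) (by omega) (by omega), this4]

theorem portA_eq (shape : List (List Int)) (x y : Int) (rotation : Int) :
    get_piece_positions shape x y rotation =
      posLoop x y ((List.range rotation.toNat).foldl (fun g _ => rot90A g) shape).length
        ((((List.range rotation.toNat).foldl (fun g _ => rot90A g) shape).headD []).length)
        (fun r c => (((List.range rotation.toNat).foldl (fun g _ => rot90A g) shape).getD r []).getD c 0) := rfl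

theorem portB_eq (hd : List Int) (tl : List (List Int)) (x y rotation : Int) (k : Nat)
    (hk : (if 0 < rotation then (PySem.Int.mod rotation 4).toNat else 0) = k) :
    get_piece_positions_alt (hd :: tl) x y rotation =
      posLoop x y
        (if k % 2 = 0 then (hd :: tl : List (List Int)).length else hd.length)
        (if k % 2 = 0 then hd.length else (hd :: tl : List (List Int)).length)
        (fun fr fc =>
          if k = 0 then (((hd :: tl : List (List Int))).getD fr []).getD fc 0
          else if k = 1 then (((hd :: tl : List (List Int))).getD ((hd :: tl : List (List Int)).length - 1 - fc) []).getD fr 0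
          else if k = 2 then (((hd :: tl : List (List Int))).getD ((hd :: tl : List (List Int)).length - 1 - fr) []).getD (hd.length - 1 - fc) 0
          else (((hd :: tl : List (List Int))).getD fc []).getD (hd.length - 1 - fr) 0) := by
  subst hk; rfl

-- ===== VERDICT (by name: the statement is the Claim_ definition above) =====
theorem get_piece_positions_spec : Claim_equal_get_piece_positions := by
  intro shape x y rotation _ hpre
  obtain ⟨hrows, hne1, hC2⟩ := hpre
  unfold Spec_get_piece_positions
  cases shape with
  | nil =>
      have hr0 : rotation ≤ 0 := by
        by_contra h
        exact (hne1 (by omega)) rfl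
      have ht : rotation.toNat = 0 := by omega
      rw [portA_eq, ht]
      rfl
  | cons hd tl =>
    have hne : (hd :: tl : List (List Int)) ≠ [] := by simp
    by_cases hrpos : 0 < rotation
    · have hmod : PySem.Int.mod rotation 4 = rotation % 4 := PySem.Int.mod_eq_emod_of_pos (by norm_num)
      have hn1 : 1 ≤ rotation.toNat := by omega
      have hkval : (if 0 < rotation then (PySem.Int.mod rotation 4).toNat else 0) = rotation.toNat % 4 := by
        rw [if_pos hrpos, hmod]; omega
      rw [portA_eq, portB_eq hd tl x y rotation _ hkval, foldl_rot, List.length_range]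
      by_cases hC0 : hd.length = 0
      · -- first row empty: then rotation = 1, both loops are empty
        have hr1 : rotation = 1 := by
          by_contra h
          have h2 : 2 ≤ rotation := by omega
          have := hC2 h2
          simp [List.headD] at this
          omega
        have hnt : rotation.toNat = 1 := by omega
        rw [hnt]
        have h1 : rot90A^[1] (hd :: tl) = mkG hd.length (hd :: tl : List (List Int)).length
            (fun i j => (((hd :: tl : List (List Int))).getD ((hd :: tl : List (List Int)).length - 1 - j) []).getD i 0) :=
          rot90A_eq (hd :: tl)
        rw [h1, hC0]
        rfl
      · have hCpos : 0 < ((hd :: tl : List (List Int)).headD []).length := by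
          simp [List.headD]; omega
        have hRpos : 0 < (hd :: tl : List (List Int)).length := by simp
        have hforms := rot_iter_forms (hd :: tl) hne hCpos rotation.toNat hn1
        have hk4 : rotation.toNat % 4 = 0 ∨ rotation.toNat % 4 = 1 ∨ rotation.toNat % 4 = 2 ∨ rotation.toNat % 4 = 3 := by omega
        rcases hk4 with h | h | h | h <;> rw [h] at hforms ⊢ <;>
          simp only [Nat.reduceMod, Nat.reduceEqDiff, reduceIte] at hforms ⊢ <;>
          rw [hforms, posLoop_mkG _ _ _ _ _ (by first | exact hRpos | exact hCpos)] <;>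
          simp only [List.headD_cons]
    · have ht : rotation.toNat = 0 := by omega
      rw [portA_eq, portB_eq hd tl x y rotation 0 (by rw [if_neg hrpos]), ht]
      rfl
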